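-- pv_equiv track=rewrite | github.com/medscrape/DocNexus-AI-Search_Prototype | v1_agent.py | _contains_time_words
-- ===== SOURCE A (Python) =====
-- def _contains_time_words(text: str) -> bool:
--     text = text.lower()
--     time_words = [
--         "trend", "over time", "per month", "by month", "monthly",
--         "per year", "by year", "yearly", "timeline", "time series",
--         "moM", "YoY".lower()
--     ]
--     return any(w in text for w in time_words)
-- ===== SOURCE B (Python) =====
-- def _contains_time_words(text: str) -> bool:
--     t = text.lower()
--     time_words = [
--         "trend", "over time", "per month", "by month", "monthly",
--         "per year", "by year", "yearly", "timeline", "time series",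
--         "moM", "YoY".lower()
--     ]
--     words = [list(w) for w in time_words]
--     # single pass: 'active' holds the remaining suffixes of keywords partially
--     # matched so far (an NFA state set); a keyword is found when a suffix empties
--     active = []
--     for ch in t:
--         consumed = [w[1:] for w in active + words if w and w[0] == ch]
--         if [] in consumed:
--             return True
--         active = consumed
--     return False
-- ===== Notes on version B (the rewrite author's own statement) =====
-- stated objective: alternative
-- what changed: Replaces A's twelve independent substring-membership scans with one left-to-right pass that maintains a set of active partial keyword matches (NFA-style multi-pattern matching) and reports success when any partial match completes.
import Mathlib
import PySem

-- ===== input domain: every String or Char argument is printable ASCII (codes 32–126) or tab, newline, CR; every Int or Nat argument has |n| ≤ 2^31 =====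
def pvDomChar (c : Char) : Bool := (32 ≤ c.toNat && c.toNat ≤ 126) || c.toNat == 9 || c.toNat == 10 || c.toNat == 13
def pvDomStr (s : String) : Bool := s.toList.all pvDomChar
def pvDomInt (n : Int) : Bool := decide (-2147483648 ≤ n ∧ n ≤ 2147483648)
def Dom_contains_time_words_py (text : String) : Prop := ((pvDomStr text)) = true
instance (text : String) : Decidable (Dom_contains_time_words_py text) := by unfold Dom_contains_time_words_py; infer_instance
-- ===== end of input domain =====

-- B replaces the per-keyword substring scans with one pass maintaining an active-partial-match set (alternative algorithm, no speed claim).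

-- ===== PORT A =====
-- the keyword list, shared verbatim by both Pythons ("moM" stays mixed-case, "YoY".lower())
def pvTimeWords : List String :=
  ["trend", "over time", "per month", "by month", "monthly",
   "per year", "by year", "yearly", "timeline", "time series",
   "moM", PySem.Str.lower "YoY"]

def contains_time_words_py (text : String) : Bool :=
  let t := PySem.Str.lower text
  pvTimeWords.any (fun w => PySem.Str.isIn w t)

-- ===== PORT B =====
-- B's 'words = [list(w) for w in time_words]'
def pvWordLists : List (List Char) := pvTimeWords.map String.toList

-- B's list comprehension: keep candidates whose first char is ch, with that char consumed
def pvStep (ch : Char) (cands : List (List Char)) : List (List Char) :=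
  cands.filterMap (fun w =>
    match w with
    | [] => none
    | c :: r => if c == ch then some r else none)

-- B's loop: early 'return True' when a keyword completes, else continue with the new active set
def pvRun (active : List (List Char)) : List Char → Bool
  | [] => false
  | ch :: rest =>
    let consumed := pvStep ch (active ++ pvWordLists)
    if [] ∈ consumed then true else pvRun consumed rest

def contains_time_words_py_alt (text : String) : Bool :=
  pvRun [] (PySem.Str.lower text).toList

-- ===== PRECONDITION & SPEC =====
def Spec_contains_time_words_py (text : String) (out : Bool) : Prop := out = contains_time_words_py_alt text
instance (text : String) (out : Bool) : Decidable (Spec_contains_time_words_py text out) := by unfold Spec_contains_time_words_py; infer_instance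

-- ===== CLAIM (what is proved, stated in full; the proofs are below) =====
def Claim_equal_contains_time_words_py : Prop := ∀ (text : String), Dom_contains_time_words_py text → Spec_contains_time_words_py text (contains_time_words_py text)

-- ===== LEMMAS AND PROOFS =====
theorem pvWordLists_ne_nil : ∀ w ∈ pvWordLists, w ≠ [] := by decide

theorem mem_pvStep (ch : Char) (cands : List (List Char)) (r : List Char) :
    r ∈ pvStep ch cands ↔ (ch :: r) ∈ cands := by
  simp only [pvStep, List.mem_filterMap]
  constructor
  · rintro ⟨w, hw, h⟩
    match w with
    | [] => simp at h
    | c :: r' =>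
      by_cases hc : c == ch
      · simp [hc] at h; subst h; exact (eq_of_beq hc) ▸ hw
      · simp [hc] at h
  · intro h
    exact ⟨ch :: r, h, by simp⟩

-- invariant characterisation of B's loop state
theorem pvRun_iff (cs : List Char) : ∀ active : List (List Char), [] ∉ active →
    (pvRun active cs = true ↔
      (∃ a ∈ active, a <+: cs) ∨ ∃ w ∈ pvWordLists, ∃ i, w <+: cs.drop i) := by
  induction cs with
  | nil =>
    intro active hact
    simp only [pvRun]
    constructor
    · intro h; exact absurd h (by simp)
    · rintro (⟨a, ha, hpre⟩ | ⟨w, hw, i, hpre⟩)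
      · exact absurd (List.prefix_nil.mp hpre ▸ ha) hact
      · exact absurd (List.prefix_nil.mp (by simpa using hpre)) (pvWordLists_ne_nil w hw)
  | cons ch rest ih =>
    intro active hact
    simp only [pvRun]
    have hmem : ∀ r, r ∈ pvStep ch (active ++ pvWordLists) ↔
        (ch :: r) ∈ active ∨ (ch :: r) ∈ pvWordLists := by
      intro r; rw [mem_pvStep]; exact List.mem_append
    by_cases hnil : ([] : List Char) ∈ pvStep ch (active ++ pvWordLists)
    · rw [if_pos hnil]
      constructor
      · intro _
        rcases (hmem []).mp hnil with h | h
        · exact Or.inl ⟨[ch], h, by simp⟩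
        · exact Or.inr ⟨[ch], h, 0, by simp⟩
      · intro _; rfl
    · rw [if_neg hnil, ih _ hnil]
      constructor
      · rintro (⟨a, ha, hpre⟩ | ⟨w, hw, i, hpre⟩)
        · rcases (hmem a).mp ha with h | h
          · exact Or.inl ⟨ch :: a, h, List.cons_prefix_cons.mpr ⟨rfl, hpre⟩⟩
          · refine Or.inr ⟨ch :: a, h, 0, ?_⟩
            simp only [List.drop_zero]
            exact List.cons_prefix_cons.mpr ⟨rfl, hpre⟩
        · exact Or.inr ⟨w, hw, i + 1, by simpa using hpre⟩
      · rintro (⟨a, ha, hpre⟩ | ⟨w, hw, i, hpre⟩)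
        · match a, hpre with
          | [], _ => exact absurd ha hact
          | a0 :: a', hpre =>
            obtain ⟨rfl, hpre'⟩ := List.cons_prefix_cons.mp hpre
            exact Or.inl ⟨a', (hmem a').mpr (Or.inl ha), hpre'⟩
        · match i, hpre with
          | 0, hpre =>
            match w, pvWordLists_ne_nil w hw, hpre with
            | w0 :: w', _, hpre =>
              obtain ⟨rfl, hpre'⟩ := List.cons_prefix_cons.mp (by simpa using hpre)
              exact Or.inl ⟨w', (hmem w').mpr (Or.inr hw), hpre'⟩
          | i + 1, hpre => exact Or.inr ⟨w, hw, i, by simpa using hpre⟩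

-- ===== VERDICT (by name: the statement is the Claim_ definition above) =====
theorem contains_time_words_py_spec : Claim_equal_contains_time_words_py := by
  intro text _
  unfold Spec_contains_time_words_py contains_time_words_py contains_time_words_py_alt
  apply Bool.eq_iff_iff.mpr
  rw [pvRun_iff _ [] (by simp)]
  simp only [List.any_eq_true, PySem.Str.isIn_eq, List.not_mem_nil, false_and, exists_false,
    false_or, pvWordLists, List.mem_map]
  constructor
  · rintro ⟨w, hw, hin⟩
    obtain ⟨j, hj⟩ := (PySem.Chars.exists_prefix_drop_iff_isIn w.toList _).mpr hin
    exact ⟨w.toList, ⟨w, hw, rfl⟩, j, hj⟩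
  · rintro ⟨wl, ⟨w, hw, rfl⟩, i, hpre⟩
    exact ⟨w, hw, (PySem.Chars.exists_prefix_drop_iff_isIn w.toList _).mp ⟨i, hpre⟩⟩
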